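-- pv_equiv track=rewrite | github.com/pacifico2138097/GIT_HUB | PAR3_ex.py | partit_with_repeats
-- ===== SOURCE A (Python) =====
-- def partit_with_repeats(A):
--     n = len(A)
--     if n == 0:
--         return []
--
--     pivot = A[0]
--     less_than = []
--     equal_to = []
--     greater_than = []
--
--     for i in range(n):
--         if A[i] < pivot:
--             less_than.append(A[i])
--         elif A[i] > pivot:
--             greater_than.append(A[i])
--         else:
--             equal_to.append(A[i])
--
--     B = less_than + equal_to + greater_than
--     return B
-- ===== SOURCE B (Python) =====
-- def partit_with_repeats(A):
--     if not A:
--         return []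
--     pivot = A[0]
--     return sorted(A, key=lambda x: 0 if x < pivot else (2 if x > pivot else 1))
-- ===== Notes on version B (the rewrite author's own statement) =====
-- stated objective: idiomatic
-- what changed: Replaces the three-bucket single-pass scan with a stable sort keyed 0/1/2 by comparison to the pivot (the first element); stability makes sorted(A, key) equal to less+equal+greater.
import Mathlib
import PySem

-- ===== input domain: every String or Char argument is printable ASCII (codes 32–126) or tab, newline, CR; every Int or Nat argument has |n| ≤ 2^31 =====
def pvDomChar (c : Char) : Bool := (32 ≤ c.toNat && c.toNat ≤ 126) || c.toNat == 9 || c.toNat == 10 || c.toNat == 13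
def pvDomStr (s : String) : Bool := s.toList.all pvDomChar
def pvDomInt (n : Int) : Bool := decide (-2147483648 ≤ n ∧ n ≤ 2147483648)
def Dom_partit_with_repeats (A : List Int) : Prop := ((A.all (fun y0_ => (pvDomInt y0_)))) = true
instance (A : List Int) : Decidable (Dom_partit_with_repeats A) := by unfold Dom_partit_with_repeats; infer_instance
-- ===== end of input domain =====

-- B replaces A's single-pass three-bucket scan with a stable sort keyed 0/1/2 against the pivot (idiomatic; not faster).


-- ===== PORT A =====
-- literal port of A: index loop over range(n) appending into three buckets, then concatenation
def partit_with_repeats (A : List Int) : List Int :=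
  let n : Int := A.length
  if n = 0 then []
  else
    let pivot := PySem.List.pyGetD A 0 0
    let r := (PySem.List.pyRange 0 n 1).foldl
      (fun (acc : List Int × List Int × List Int) i =>
        let x := PySem.List.pyGetD A i 0
        if x < pivot then (acc.1 ++ [x], acc.2.1, acc.2.2)
        else if pivot < x then (acc.1, acc.2.1, acc.2.2 ++ [x])
        else (acc.1, acc.2.1 ++ [x], acc.2.2))
      ([], [], [])
    r.1 ++ r.2.1 ++ r.2.2

-- ===== PORT B =====
-- literal port of B: stable sort by the key 0 (< pivot) / 2 (> pivot) / 1 (else)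
def partit_with_repeats_alt (A : List Int) : List Int :=
  match A with
  | [] => []
  | pivot :: _ =>
    PySem.List.sorted A (fun x => if x < pivot then (0 : Int) else if pivot < x then 2 else 1) false

-- ===== PRECONDITION & SPEC =====
def Spec_partit_with_repeats (A : List Int) (out : List Int) : Prop := out = partit_with_repeats_alt A
instance (A : List Int) (out : List Int) : Decidable (Spec_partit_with_repeats A out) := by unfold Spec_partit_with_repeats; infer_instance

-- ===== CLAIM (what is proved, stated in full; the proofs are below) =====
def Claim_equal_partit_with_repeats : Prop := ∀ (A : List Int), Dom_partit_with_repeats A → Spec_partit_with_repeats A (partit_with_repeats A)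

-- ===== LEMMAS AND PROOFS =====

-- insertBy passes over a prefix it never inserts before
lemma insertBy_append_of_all_false {α : Type} (before : α → α → Bool) (x : α)
    (ys zs : List α) (h : ∀ y ∈ ys, before x y = false) :
    PySem.List.insertBy before x (ys ++ zs) = ys ++ PySem.List.insertBy before x zs := by
  induction ys with
  | nil => simp
  | cons y t ih =>
    simp only [List.cons_append, PySem.List.insertBy]
    rw [h y (by simp)]
    simp only [ite_false, Bool.false_eq_true]
    rw [ih (fun y hy => h y (by simp [hy]))]

-- insertBy puts x in front when it goes before everything
lemma insertBy_of_all_true {α : Type} (before : α → α → Bool) (x : α)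
    (ys : List α) (h : ∀ y ∈ ys, before x y = true) :
    PySem.List.insertBy before x ys = x :: ys := by
  cases ys with
  | nil => rfl
  | cons y t => simp [PySem.List.insertBy, h y (by simp)]

-- the key used by B
def pvKey (p x : Int) : Int := if x < p then 0 else if p < x then 2 else 1

-- stability of B's insertion sort on a three-valued key: the fold keeps the
-- accumulator in the bucketed shape l ++ e ++ g
lemma foldl_insertBy_buckets (p : Int) (xs l e g : List Int)
    (hl : ∀ y ∈ l, y < p) (he : ∀ y ∈ e, ¬ y < p ∧ ¬ p < y) (hg : ∀ y ∈ g, p < y) :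
    List.foldl (fun acc x => PySem.List.insertBy (fun a b => decide (pvKey p a < pvKey p b)) x acc)
        (l ++ e ++ g) xs
      = (l ++ xs.filter (fun x => decide (x < p)))
        ++ (e ++ xs.filter (fun x => !decide (x < p) && !decide (p < x)))
        ++ (g ++ xs.filter (fun x => decide (p < x))) := by
  induction xs generalizing l e g with
  | nil => simp
  | cons x t ih =>
    simp only [List.foldl_cons, List.filter_cons]
    by_cases h1 : x < p
    · have step : PySem.List.insertBy (fun a b => decide (pvKey p a < pvKey p b)) x (l ++ e ++ g)
          = (l ++ [x]) ++ e ++ g := by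
        rw [List.append_assoc, insertBy_append_of_all_false _ _ l (e ++ g)
          (fun y hy => by simp [pvKey, h1, hl y hy]),
          insertBy_of_all_true _ _ (e ++ g) (fun y hy => by
            rcases List.mem_append.1 hy with hy | hy
            · have := he y hy; simp [pvKey, h1, this.1, this.2]
            · have := hg y hy; simp [pvKey, h1, this, asymm this])]
        simp
      rw [step, ih (l ++ [x]) e g
        (fun y hy => by rcases List.mem_append.1 hy with hy | hy
                        · exact hl y hy
                        · simp at hy; omega) he hg]
      simp only [h1, decide_true, if_true, Bool.not_true, Bool.false_and,
        if_false, decide_eq_true_eq, decide_eq_false_iff_not, not_lt.2 h1.le,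
        decide_false, Bool.not_false, Bool.and_self]
      simp [h1, not_lt.2 h1.le, List.append_assoc]
    · by_cases h2 : p < x
      · have step : PySem.List.insertBy (fun a b => decide (pvKey p a < pvKey p b)) x (l ++ e ++ g)
            = l ++ e ++ (g ++ [x]) := by
          rw [List.append_assoc, insertBy_append_of_all_false _ _ l (e ++ g)
            (fun y hy => by have := hl y hy; simp [pvKey, h1, h2, this]),
            insertBy_append_of_all_false _ _ e g
            (fun y hy => by have := he y hy; simp [pvKey, h1, h2, this.1, this.2]),
            PySem.List.insertBy_of_forall_not_before _ _ g
            (fun y hy => by have := hg y hy; simp [pvKey, h1, h2, this, asymm this])]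
          simp
        rw [step, ih l e (g ++ [x]) hl he
          (fun y hy => by rcases List.mem_append.1 hy with hy | hy
                          · exact hg y hy
                          · simp at hy; omega)]
        simp [h1, h2, List.append_assoc]
      · have step : PySem.List.insertBy (fun a b => decide (pvKey p a < pvKey p b)) x (l ++ e ++ g)
            = l ++ (e ++ [x]) ++ g := by
          rw [List.append_assoc, insertBy_append_of_all_false _ _ l (e ++ g)
            (fun y hy => by have := hl y hy; simp [pvKey, h1, h2, this]),
            insertBy_append_of_all_false _ _ e g
            (fun y hy => by have := he y hy; simp [pvKey, h1, h2, this.1, this.2]),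
            insertBy_of_all_true _ _ g
            (fun y hy => by have := hg y hy; simp [pvKey, h1, h2, this, asymm this])]
          simp
        rw [step, ih l (e ++ [x]) g hl
          (fun y hy => by rcases List.mem_append.1 hy with hy | hy
                          · exact he y hy
                          · simp at hy; omega) hg]
        simp [h1, h2, List.append_assoc]

-- A's triple-bucket fold computes the three filters
lemma foldA_buckets (p : Int) (xs : List Int) (l e g : List Int) :
    xs.foldl (fun (acc : List Int × List Int × List Int) x =>
        if x < p then (acc.1 ++ [x], acc.2.1, acc.2.2)
        else if p < x then (acc.1, acc.2.1, acc.2.2 ++ [x])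
        else (acc.1, acc.2.1 ++ [x], acc.2.2)) (l, e, g)
      = (l ++ xs.filter (fun x => decide (x < p)),
         e ++ xs.filter (fun x => !decide (x < p) && !decide (p < x)),
         g ++ xs.filter (fun x => decide (p < x))) := by
  induction xs generalizing l e g with
  | nil => simp
  | cons x t ih =>
    simp only [List.foldl_cons, List.filter_cons]
    by_cases h1 : x < p
    · simp only [h1, if_true]; rw [ih]; simp [h1, not_lt.2 h1.le]
    · by_cases h2 : p < x
      · simp only [h1, if_false, h2, if_true]; rw [ih]; simp [h1, h2]
      · simp only [h1, if_false, h2, if_false]; rw [ih]; simp [h1, h2]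

-- ===== VERDICT (by name: the statement is the Claim_ definition above) =====
theorem partit_with_repeats_spec : Claim_equal_partit_with_repeats := by
  intro A _
  unfold Spec_partit_with_repeats
  cases A with
  | nil => rfl
  | cons p t =>
    show partit_with_repeats (p :: t)
      = PySem.List.sorted (p :: t) (fun x => if x < p then (0 : Int) else if p < x then 2 else 1) false
    unfold partit_with_repeats
    rw [if_neg (by simp only [List.length_cons]; push_cast; omega)]
    have hget : PySem.List.pyGetD (p :: t) 0 0 = p := PySem.List.pyGetD_zero_cons p t 0
    rw [hget]
    simp only []
    have hfold := PySem.List.foldl_pyRange_zero_pyGetD' (p :: t) 0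
      (fun (acc : List Int × List Int × List Int) x =>
        if x < p then (acc.1 ++ [x], acc.2.1, acc.2.2)
        else if p < x then (acc.1, acc.2.1, acc.2.2 ++ [x])
        else (acc.1, acc.2.1 ++ [x], acc.2.2))
      (([], [], []) : List Int × List Int × List Int)
    rw [hfold, foldA_buckets p (p :: t) [] [] []]
    rw [PySem.List.sorted_eq_foldl_insertBy]
    have hB := foldl_insertBy_buckets p (p :: t) [] [] []
      (by simp) (by simp) (by simp)
    simp only [pvKey, List.nil_append] at hB
    simp only [List.nil_append]
    exact hB.symm
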